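-- pv_equiv track=rewrite | github.com/sgl-project/sglang | python/sglang/srt/lora/utils.py | build_lm_head_pass_segments
-- ===== SOURCE A (Python) =====
-- from typing import Iterable, List, Optional, Set, Tuple
--
-- def build_lm_head_pass_segments(
--     weight_indices: List[int],
--     pruned_lens: List[int],
--     logprobs_chunk_size: int,
-- ) -> List[Tuple[List[int], List[int]]]:
--     """
--     Precompute per-pass segment info for lm_head LoRA logprobs processing.
--
--     When LogitsProcessor uses chunked logprobs processing
--     (process_input_logprobs_by_chunk), pruned hidden states are split into
--     fixed-size passes.  Each pass needs its own segmentation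
--     (weight_indices, seg_lens) so that lm_head LoRA operates on the
--     correct adapter assignments per pass.
--
--     Args:
--         weight_indices: Per-sequence adapter indices.
--         pruned_lens: Per-sequence pruned token counts.
--         logprobs_chunk_size: Fixed pass size used by LogitsProcessor.
--
--     Returns:
--         List of (seg_weight_indices, seg_lens) tuples, one per pass.
--     """
--     # Expand to per-token weight index
--     token_wi: List[int] = []
--     for wi, pl in zip(weight_indices, pruned_lens):
--         token_wi.extend([wi] * pl)
--     total = len(token_wi)
--     num_passes = (total + logprobs_chunk_size - 1) // logprobs_chunk_size
--
--     result: List[Tuple[List[int], List[int]]] = []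
--     for i in range(num_passes):
--         start = i * logprobs_chunk_size
--         end = min((i + 1) * logprobs_chunk_size, total)
--
--         # Run-length encode the pass's adapter indices
--         seg_wi: List[int] = []
--         seg_lens: List[int] = []
--         for t in range(start, end):
--             if seg_wi and seg_wi[-1] == token_wi[t]:
--                 seg_lens[-1] += 1
--             else:
--                 seg_wi.append(token_wi[t])
--                 seg_lens.append(1)
--         result.append((seg_wi, seg_lens))
--
--     return result
-- ===== SOURCE B (Python) =====
-- from typing import List, Tuple
--
-- def build_lm_head_pass_segments(
--     weight_indices: List[int],
--     pruned_lens: List[int],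
--     logprobs_chunk_size: int,
-- ) -> List[Tuple[List[int], List[int]]]:
--     # Walk the (adapter index, run length) pairs directly: split each run at
--     # pass boundaries and merge it into the current pass's last segment when
--     # the adapter index matches, without ever materialising per-token data.
--     result: List[Tuple[List[int], List[int]]] = []
--     seg_wi: List[int] = []
--     seg_lens: List[int] = []
--     room = logprobs_chunk_size
--     for wi, pl in zip(weight_indices, pruned_lens):
--         while pl > 0:
--             take = min(pl, room)
--             if seg_wi and seg_wi[-1] == wi:
--                 seg_lens[-1] += take
--             else:
--                 seg_wi.append(wi)
--                 seg_lens.append(take)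
--             pl -= take
--             room -= take
--             if room == 0:
--                 result.append((seg_wi, seg_lens))
--                 seg_wi, seg_lens = [], []
--                 room = logprobs_chunk_size
--     if seg_wi:
--         result.append((seg_wi, seg_lens))
--     return result
-- ===== Notes on version B (the rewrite author's own statement) =====
-- stated objective: faster
-- what changed: Instead of expanding adapter indices to one entry per token and run-length-encoding each pass over that token list, B walks the (index, run-length) pairs directly, splitting runs at pass boundaries and merging equal adjacent indices, so no per-token work is done.
-- outside the precondition, e.g. on build_lm_head_pass_segments([], [], -1): A returns [([], []), ([], [])], B returns []; on build_lm_head_pass_segments([1], [1], 0): A raises ZeroDivisionError, B does not finish within the time limit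
import Mathlib
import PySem

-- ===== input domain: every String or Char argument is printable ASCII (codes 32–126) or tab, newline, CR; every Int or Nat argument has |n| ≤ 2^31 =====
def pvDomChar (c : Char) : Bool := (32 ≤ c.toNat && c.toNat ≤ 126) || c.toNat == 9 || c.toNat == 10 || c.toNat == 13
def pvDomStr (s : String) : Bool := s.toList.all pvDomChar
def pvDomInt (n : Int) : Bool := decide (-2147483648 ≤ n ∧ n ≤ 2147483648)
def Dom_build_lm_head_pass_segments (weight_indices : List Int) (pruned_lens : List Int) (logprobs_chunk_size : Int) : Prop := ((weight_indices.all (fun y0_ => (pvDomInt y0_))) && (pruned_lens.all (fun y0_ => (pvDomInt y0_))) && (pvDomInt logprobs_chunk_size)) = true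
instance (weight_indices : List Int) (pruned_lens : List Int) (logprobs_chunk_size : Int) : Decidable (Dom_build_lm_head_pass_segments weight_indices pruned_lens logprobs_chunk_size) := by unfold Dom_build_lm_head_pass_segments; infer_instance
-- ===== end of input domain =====

-- B replaces A's per-token expansion + per-pass RLE by a single walk over the
-- (adapter index, run length) pairs, splitting runs at pass boundaries and
-- merging equal adjacent indices; a timing run measured it faster.


-- ===== PORT A =====
-- the RLE step of A's inner loop: 'if seg_wi and seg_wi[-1] == tok: seg_lens[-1] += 1 else: append'
def pvRleStep (s : List Int × List Int) (tok : Int) : List Int × List Int :=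
  if s.1 ≠ [] ∧ PySem.List.pyGetD s.1 (-1) 0 = tok
  then (s.1, s.2.dropLast ++ [PySem.List.pyGetD s.2 (-1) 0 + 1])
  else (s.1 ++ [tok], s.2 ++ [1])

-- body of A's outer loop for pass i
def pvPassSeg (token_wi : List Int) (c total i : Int) : List Int × List Int :=
  let start := i * c
  let end_ := min ((i + 1) * c) total
  (PySem.List.pyRange start end_ 1).foldl
    (fun s t => pvRleStep s (PySem.List.pyGetD token_wi t 0)) ([], [])

def build_lm_head_pass_segments (weight_indices : List Int) (pruned_lens : List Int) (logprobs_chunk_size : Int) : List (List Int × List Int) :=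
  let token_wi : List Int := (weight_indices.zip pruned_lens).foldl
    (fun acc p => acc ++ List.replicate p.2.toNat p.1) []
  let total : Int := token_wi.length
  let num_passes := PySem.Int.floordiv (total + logprobs_chunk_size - 1) logprobs_chunk_size
  (PySem.List.pyRange 0 num_passes 1).foldl
    (fun res i => res ++ [pvPassSeg token_wi logprobs_chunk_size total i]) []

-- ===== PORT B =====
-- B's inner 'while pl > 0' loop; fuel pl.toNat suffices on Pre_ (each iteration takes ≥ 1)
def pvConsume (c wi : Int) : Nat → Int →
    (List (List Int × List Int) × List Int × List Int × Int) →
    (List (List Int × List Int) × List Int × List Int × Int)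
  | 0, _, st => st
  | fuel + 1, pl, st =>
    if 0 < pl then
      let take := min pl st.2.2.2
      let s' := if st.2.1 ≠ [] ∧ PySem.List.pyGetD st.2.1 (-1) 0 = wi
        then (st.2.1, st.2.2.1.dropLast ++ [PySem.List.pyGetD st.2.2.1 (-1) 0 + take])
        else (st.2.1 ++ [wi], st.2.2.1 ++ [take])
      if st.2.2.2 - take = 0 then pvConsume c wi fuel (pl - take) (st.1 ++ [s'], [], [], c)
      else pvConsume c wi fuel (pl - take) (st.1, s'.1, s'.2, st.2.2.2 - take)
    else st

def build_lm_head_pass_segments_alt (weight_indices : List Int) (pruned_lens : List Int) (logprobs_chunk_size : Int) : List (List Int × List Int) :=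
  let st := (weight_indices.zip pruned_lens).foldl
    (fun st p => pvConsume logprobs_chunk_size p.1 p.2.toNat p.2 st)
    ([], [], [], logprobs_chunk_size)
  if st.2.1 ≠ [] then st.1 ++ [(st.2.1, st.2.2.1)] else st.1

-- ===== PRECONDITION & SPEC =====
-- Pre_ excludes non-positive chunk sizes: on 0 the Python A raises ZeroDivisionError, and on
-- negative sizes A's floor-division pass count yields phantom empty passes (e.g. two for empty
-- input) that are artifacts of its formula; a chunk size is positive in the caller.
def Pre_build_lm_head_pass_segments (weight_indices : List Int) (pruned_lens : List Int) (logprobs_chunk_size : Int) : Prop :=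
  0 < logprobs_chunk_size
instance (weight_indices : List Int) (pruned_lens : List Int) (logprobs_chunk_size : Int) : Decidable (Pre_build_lm_head_pass_segments weight_indices pruned_lens logprobs_chunk_size) := by unfold Pre_build_lm_head_pass_segments; infer_instance

def pvWitness_build_lm_head_pass_segments : List Int × List Int × Int := ([1, 2], [2, 3], 2)

def Spec_build_lm_head_pass_segments (weight_indices : List Int) (pruned_lens : List Int) (logprobs_chunk_size : Int) (out : List (List Int × List Int)) : Prop := out = build_lm_head_pass_segments_alt weight_indices pruned_lens logprobs_chunk_size
instance (weight_indices : List Int) (pruned_lens : List Int) (logprobs_chunk_size : Int) (out : List (List Int × List Int)) : Decidable (Spec_build_lm_head_pass_segments weight_indices pruned_lens logprobs_chunk_size out) := by unfold Spec_build_lm_head_pass_segments; infer_instance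

-- ===== CLAIM (what is proved, stated in full; the proofs are below) =====
def Claim_equal_build_lm_head_pass_segments : Prop := ∀ (weight_indices : List Int) (pruned_lens : List Int) (logprobs_chunk_size : Int), Dom_build_lm_head_pass_segments weight_indices pruned_lens logprobs_chunk_size → Pre_build_lm_head_pass_segments weight_indices pruned_lens logprobs_chunk_size → Spec_build_lm_head_pass_segments weight_indices pruned_lens logprobs_chunk_size (build_lm_head_pass_segments weight_indices pruned_lens logprobs_chunk_size)

-- ===== LEMMAS AND PROOFS =====

-- the per-token pass machine both ports are reduced to
def pvTStep (c : Int)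
    (st : List (List Int × List Int) × List Int × List Int × Int) (tok : Int) :
    List (List Int × List Int) × List Int × List Int × Int :=
  let s' := pvRleStep (st.2.1, st.2.2.1) tok
  if st.2.2.2 - 1 = 0 then (st.1 ++ [s'], [], [], c) else (st.1, s'.1, s'.2, st.2.2.2 - 1)

def pvFin (st : List (List Int × List Int) × List Int × List Int × Int) :
    List (List Int × List Int) :=
  if st.2.1 ≠ [] then st.1 ++ [(st.2.1, st.2.2.1)] else st.1

def pvRle (ts : List Int) : List Int × List Int := ts.foldl pvRleStep ([], [])

-- chunk size is k+1
def pvChunks (k : Nat) : List Int → List (List Int × List Int)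
  | [] => []
  | t :: ts => pvRle (t :: ts.take k) :: pvChunks k (ts.drop k)
  termination_by ts => ts.length
  decreasing_by simp

theorem pvRleStep_ne (s : List Int × List Int) (tok : Int) : (pvRleStep s tok).1 ≠ [] := by
  unfold pvRleStep; split
  · next h => exact h.1
  · simp

theorem pvRle_ne (ts : List Int) (s : List Int × List Int) (h : s.1 ≠ [] ∨ ts ≠ []) :
    (ts.foldl pvRleStep s).1 ≠ [] := by
  induction ts generalizing s with
  | nil => simpa using h.resolve_right (by simp)
  | cons t ts ih => exact ih _ (Or.inl (pvRleStep_ne s t))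

-- the mid-pass lemma: folding the token machine over ts from a state with room left
theorem pvMid (c : Int) (ts : List Int) (res : List (List Int × List Int))
    (s : List Int × List Int) (room : Int) (hr : 1 ≤ room) :
    List.foldl (pvTStep c) (res, s.1, s.2, room) ts =
      if (ts.length : Int) < room then
        (res, (ts.foldl pvRleStep s).1, (ts.foldl pvRleStep s).2, room - ts.length)
      else List.foldl (pvTStep c)
        (res ++ [(ts.take room.toNat).foldl pvRleStep s], [], [], c) (ts.drop room.toNat) := by
  induction ts generalizing res s room with
  | nil => simp [show (0 : Int) < room by omega]
  | cons t ts ih =>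
    have hsplit : pvTStep c (res, s.1, s.2, room) t =
        if room = 1 then (res ++ [pvRleStep s t], [], [], c)
        else (res, (pvRleStep s t).1, (pvRleStep s t).2, room - 1) := by
      simp only [pvTStep]
      split_ifs with h h' <;> simp_all <;> omega
    rw [List.foldl_cons, hsplit]
    rcases eq_or_lt_of_le hr with h1 | h1
    · rw [if_pos h1.symm, ← h1]
      have h2 : ¬ ((t :: ts).length : Int) < 1 := by
        simp only [List.length_cons]; push_cast; omega
      rw [if_neg h2]
      simp
    · rw [if_neg (by omega)]
      rw [ih res (pvRleStep s t) (room - 1) (by omega)]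
      by_cases h3 : ((t :: ts).length : Int) < room
      · rw [if_pos (by simp only [List.length_cons] at h3; push_cast at h3 ⊢; omega),
          if_pos h3]
        simp only [List.foldl_cons, List.length_cons]
        have : room - 1 - (ts.length : Int) = room - ((ts.length : Int) + 1) := by ring
        rw [this]; push_cast; rfl
      · rw [if_neg (by simp only [List.length_cons] at h3; push_cast at h3 ⊢; omega),
          if_neg h3]
        have h4 : (room - 1).toNat = room.toNat - 1 := by omega
        have h5 : room.toNat = (room.toNat - 1) + 1 := by omega
        have ht : (t :: ts).take room.toNat = t :: ts.take (room.toNat - 1) := by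
          conv_lhs => rw [h5]
          rw [List.take_succ_cons]
        have hd : (t :: ts).drop room.toNat = ts.drop (room.toNat - 1) := by
          conv_lhs => rw [h5]
          rw [List.drop_succ_cons]
        rw [ht, hd, List.foldl_cons, h4]

theorem pvMaster (c : Int) (hc : 0 < c) (ts : List Int) (res : List (List Int × List Int)) :
    pvFin (List.foldl (pvTStep c) (res, [], [], c) ts) = res ++ pvChunks (c.toNat - 1) ts := by
  have H : ∀ (n : Nat) (ts : List Int) (res : List (List Int × List Int)), ts.length = n →
      pvFin (List.foldl (pvTStep c) (res, [], [], c) ts) = res ++ pvChunks (c.toNat - 1) ts := by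
    intro n
    induction n using Nat.strong_induction_on with
    | _ n ih =>
      intro ts res hn
      match ts with
      | [] => simp [pvFin, pvChunks]
      | t :: ts' =>
        have hmid := pvMid c (t :: ts') res ([], []) c hc
        simp only at hmid
        rw [hmid]
        have hC1 : c.toNat = (c.toNat - 1) + 1 := by omega
        by_cases hlen : ((t :: ts').length : Int) < c
        · rw [if_pos hlen]
          have hne := pvRle_ne (t :: ts') ([], []) (Or.inr (by simp))
          have hlen' : ts'.length ≤ c.toNat - 1 := by
            simp only [List.length_cons] at hlen; push_cast at hlen; omega
          simp only [pvFin] at hne ⊢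
          rw [if_pos (by simpa using hne)]
          rw [pvChunks, List.take_of_length_le hlen',
            List.drop_eq_nil_of_le (le_trans hlen' (by omega)), pvChunks]
          simp [pvRle]
        · rw [if_neg hlen]
          have hlt : ((t :: ts').drop c.toNat).length < n := by
            simp only [List.length_drop, List.length_cons] at *; omega
          rw [ih _ hlt _ (res ++ [List.foldl pvRleStep ([], []) ((t :: ts').take c.toNat)]) rfl]
          conv_rhs => rw [pvChunks]
          have ht : (t :: ts').take c.toNat = t :: ts'.take (c.toNat - 1) := by
            conv_lhs => rw [hC1]
            rw [List.take_succ_cons]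
          have hd : (t :: ts').drop c.toNat = ts'.drop (c.toNat - 1) := by
            conv_lhs => rw [hC1]
            rw [List.drop_succ_cons]
          rw [ht, hd]
          simp [pvRle]
  exact H ts.length ts res rfl

-- B side: merging a run of k equal tokens
theorem pvMerge (c wi : Int) (k : Nat) (res : List (List Int × List Int))
    (swi slen : List Int) (room : Int) (hne : swi ≠ [])
    (hlast : PySem.List.pyGetD swi (-1) 0 = wi) (hk : 1 ≤ k) (hkr : (k : Int) ≤ room) :
    List.foldl (pvTStep c) (res, swi, slen, room) (List.replicate k wi) =
      if (k : Int) = room then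
        (res ++ [(swi, slen.dropLast ++ [PySem.List.pyGetD slen (-1) 0 + k])], [], [], c)
      else (res, swi, slen.dropLast ++ [PySem.List.pyGetD slen (-1) 0 + k], room - k) := by
  induction k generalizing slen room with
  | zero => omega
  | succ k ihk =>
    rw [List.replicate_succ, List.foldl_cons]
    have hstep : pvTStep c (res, swi, slen, room) wi =
        if room = 1 then
          (res ++ [(swi, slen.dropLast ++ [PySem.List.pyGetD slen (-1) 0 + 1])], [], [], c)
        else (res, swi, slen.dropLast ++ [PySem.List.pyGetD slen (-1) 0 + 1], room - 1) := by
      have hrle : pvRleStep (swi, slen) wi =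
          (swi, slen.dropLast ++ [PySem.List.pyGetD slen (-1) 0 + 1]) := by
        simp only [pvRleStep]
        rw [if_pos (show (swi, slen).1 ≠ [] ∧
          PySem.List.pyGetD (swi, slen).1 (-1) 0 = wi from ⟨hne, hlast⟩)]
      simp only [pvTStep, hrle]
      split_ifs with h h' <;> simp_all <;> omega
    rw [hstep]
    have harith : ∀ g : Int, g + 1 + (k : Int) = g + ((k : Int) + 1) := fun g => by ring
    by_cases h0 : k = 0
    · subst h0
      simp only [List.replicate_zero, List.foldl_nil]
      by_cases hr1 : room = 1
      · rw [if_pos hr1, if_pos (by push_cast; omega)]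
        norm_num
      · rw [if_neg hr1, if_neg (by push_cast; omega)]
        norm_num
    · have hrm : ¬ room = 1 := by push_cast at hkr; omega
      rw [if_neg hrm]
      rw [ihk (slen.dropLast ++ [PySem.List.pyGetD slen (-1) 0 + 1]) (room - 1)
        (by omega) (by push_cast at hkr ⊢; omega)]
      simp only [List.dropLast_concat, PySem.List.pyGetD_neg_one_append_singleton]
      by_cases hkr' : (k : Int) = room - 1
      · rw [if_pos hkr', if_pos (by push_cast; omega)]
        push_cast
        rw [harith]
      · rw [if_neg hkr', if_neg (by push_cast; omega)]
        push_cast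
        rw [harith]
        simp only [Prod.mk.injEq]
        refine ⟨trivial, trivial, trivial, by ring⟩

theorem pvFirst (c wi : Int) (res : List (List Int × List Int)) (swi slen : List Int)
    (room take : Int) (hr : 1 ≤ room) (ht1 : 1 ≤ take) (ht2 : take ≤ room) :
    List.foldl (pvTStep c) (res, swi, slen, room) (List.replicate take.toNat wi) =
      (let s' := if swi ≠ [] ∧ PySem.List.pyGetD swi (-1) 0 = wi
          then (swi, slen.dropLast ++ [PySem.List.pyGetD slen (-1) 0 + take])
          else (swi ++ [wi], slen ++ [take])
       if room - take = 0 then (res ++ [s'], [], [], c)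
       else (res, s'.1, s'.2, room - take)) := by
  have hstep : pvTStep c (res, swi, slen, room) wi =
      if room = 1 then (res ++ [pvRleStep (swi, slen) wi], [], [], c)
      else (res, (pvRleStep (swi, slen) wi).1, (pvRleStep (swi, slen) wi).2, room - 1) := by
    simp only [pvTStep]
    split_ifs with h h' <;> simp_all <;> omega
  have hrle : pvRleStep (swi, slen) wi =
      if swi ≠ [] ∧ PySem.List.pyGetD swi (-1) 0 = wi
      then (swi, slen.dropLast ++ [PySem.List.pyGetD slen (-1) 0 + 1])
      else (swi ++ [wi], slen ++ [1]) := rfl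
  by_cases htk : take = 1
  · subst htk
    have : (1 : Int).toNat = 1 := rfl
    rw [this, List.replicate_one, List.foldl_cons, List.foldl_nil, hstep]
    by_cases hr1 : room = 1
    · rw [if_pos hr1, if_pos (by omega), hrle]
    · rw [if_neg hr1, if_neg (by omega), hrle]
  · have htake2 : 2 ≤ take := by omega
    have hto : take.toNat = 1 + (take.toNat - 1) := by omega
    rw [hto, List.replicate_add, List.replicate_one, List.foldl_append, List.foldl_cons,
      List.foldl_nil, hstep, if_neg (by omega : ¬ room = 1)]
    have hkc : ((take.toNat - 1 : Nat) : Int) = take - 1 := by omega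
    by_cases hcond : swi ≠ [] ∧ PySem.List.pyGetD swi (-1) 0 = wi
    · rw [hrle, if_pos hcond, if_pos hcond]
      rw [pvMerge c wi (take.toNat - 1) res swi
        (slen.dropLast ++ [PySem.List.pyGetD slen (-1) 0 + 1]) (room - 1) hcond.1 hcond.2
        (by omega) (by omega)]
      simp only [List.dropLast_concat, PySem.List.pyGetD_neg_one_append_singleton, hkc]
      have harith : PySem.List.pyGetD slen (-1) 0 + 1 + (take - 1) =
          PySem.List.pyGetD slen (-1) 0 + take := by ring
      rw [harith]
      by_cases hfl : take = room
      · rw [if_pos (by omega), if_pos (by omega)]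
      · rw [if_neg (by omega), if_neg (by omega)]
        simp only [Prod.mk.injEq]
        refine ⟨trivial, trivial, trivial, by ring⟩
    · rw [hrle, if_neg hcond, if_neg hcond]
      rw [pvMerge c wi (take.toNat - 1) res (swi ++ [wi]) (slen ++ [1]) (room - 1)
        (by simp) (PySem.List.pyGetD_neg_one_append_singleton _ _ _) (by omega) (by omega)]
      simp only [List.dropLast_concat, PySem.List.pyGetD_neg_one_append_singleton, hkc]
      have harith : (1 : Int) + (take - 1) = take := by ring
      rw [harith]
      by_cases hfl : take = room
      · rw [if_pos (by omega), if_pos (by omega)]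
      · rw [if_neg (by omega), if_neg (by omega)]
        simp only [Prod.mk.injEq]
        refine ⟨trivial, trivial, trivial, by ring⟩

theorem pvConsume_eq (c wi : Int) (hc : 0 < c) (fuel : Nat) (pl : Int)
    (st : List (List Int × List Int) × List Int × List Int × Int)
    (hr : 1 ≤ st.2.2.2) (hf : pl.toNat ≤ fuel) :
    pvConsume c wi fuel pl st = List.foldl (pvTStep c) st (List.replicate pl.toNat wi) := by
  induction fuel generalizing pl st with
  | zero =>
    have h0 : pl.toNat = 0 := by omega
    rw [h0]
    simp [pvConsume]
  | succ fuel ih =>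
    by_cases hpl : 0 < pl
    · obtain ⟨res, swi, slen, room⟩ := st
      simp only at hr
      have htake1 : 1 ≤ min pl room := le_min (by omega) hr
      have htake2 : min pl room ≤ room := min_le_right _ _
      have hsplitN : pl.toNat = (min pl room).toNat + (pl - min pl room).toNat := by omega
      rw [hsplitN, List.replicate_add, List.foldl_append,
        pvFirst c wi res swi slen room (min pl room) hr htake1 htake2]
      simp only [pvConsume, if_pos hpl]
      by_cases hfl : room - min pl room = 0
      · rw [if_pos hfl, if_pos hfl]
        exact ih (pl - min pl room) _ (by simp; omega) (by omega)
      · rw [if_neg hfl, if_neg hfl]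
        exact ih (pl - min pl room) _ (by simp; omega) (by omega)
    · have h0 : pl.toNat = 0 := by omega
      rw [h0]
      simp [pvConsume, hpl]

theorem pvRoom (c : Int) (hc : 1 ≤ c) (ts : List Int)
    (st : List (List Int × List Int) × List Int × List Int × Int) (hr : 1 ≤ st.2.2.2) :
    1 ≤ (List.foldl (pvTStep c) st ts).2.2.2 := by
  induction ts generalizing st with
  | nil => simpa using hr
  | cons t ts ih =>
    rw [List.foldl_cons]
    apply ih
    simp only [pvTStep]
    split_ifs with h
    · simpa using hc
    · simp only
      omega

theorem pvB_flat (c : Int) (hc : 0 < c) (l : List (Int × Int))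
    (st : List (List Int × List Int) × List Int × List Int × Int) (hr : 1 ≤ st.2.2.2) :
    l.foldl (fun st p => pvConsume c p.1 p.2.toNat p.2 st) st =
      List.foldl (pvTStep c) st (l.flatMap (fun p => List.replicate p.2.toNat p.1)) := by
  induction l generalizing st with
  | nil => simp
  | cons p l ihl =>
    rw [List.foldl_cons, List.flatMap_cons, List.foldl_append,
      pvConsume_eq c p.1 hc p.2.toNat p.2 st hr le_rfl]
    exact ihl _ (pvRoom c hc _ st hr)

-- A side
theorem pvA_pass (tokens : List Int) (c i : Int) (hc : 0 < c) (hi : 0 ≤ i) :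
    pvPassSeg tokens c (tokens.length : Int) i =
      pvRle ((tokens.drop (i * c).toNat).take c.toNat) := by
  simp only [pvPassSeg]
  by_cases hs : (tokens.length : Int) ≤ i * c
  · rw [PySem.List.pyRange_one_eq_nil (by omega : min ((i + 1) * c) (tokens.length : Int) ≤ i * c)]
    rw [List.drop_eq_nil_of_le (by omega : tokens.length ≤ (i * c).toNat)]
    simp [pvRle]
  · push Not at hs
    have hs0 : (0 : Int) ≤ i * c := mul_nonneg hi hc.le
    have hmul : (i + 1) * c = i * c + c := by ring
    set e : Int := min ((i + 1) * c) (tokens.length : Int) with hedef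
    have he1 : i * c < e := by omega
    have he2 : e ≤ (tokens.length : Int) := min_le_right _ _
    have he : e = ((tokens.take e.toNat).length : Int) := by
      simp only [List.length_take]
      omega
    have hcongr : List.foldl (fun s t => pvRleStep s (PySem.List.pyGetD tokens t 0)) ([], [])
          (PySem.List.pyRange (i * c) e) =
        List.foldl (fun s t => pvRleStep s (PySem.List.pyGetD (tokens.take e.toNat) t 0)) ([], [])
          (PySem.List.pyRange (i * c) e) := by
      apply (PySem.List.foldl_congr_mem _ _ _ _ ?_).symm.symm
      intro acc t ht
      rw [PySem.List.mem_pyRange_one] at ht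
      rw [PySem.List.pyGetD_eq_getElem tokens 0 (by omega) (by omega),
        PySem.List.pyGetD_eq_getElem _ 0 (by omega)
          (by simp only [List.length_take]; omega),
        List.getElem_take]
    rw [hcongr, show PySem.List.pyRange (i * c) e =
        PySem.List.pyRange (i * c) (((tokens.take e.toNat).length : Nat) : Int) from by
          rw [← he],
      PySem.List.foldl_pyRange_pyGetD' (tokens.take e.toNat) 0 pvRleStep ([], []) hs0]
    show pvRle _ = pvRle _
    congr 1
    rw [List.drop_take]
    have h1 : e.toNat - (i * c).toNat = min c.toNat ((tokens.drop (i * c).toNat).length) := by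
      simp only [List.length_drop]
      omega
    rw [h1, ← List.take_take, List.take_length]

theorem pvA_chunks (C : Nat) (hC : 0 < C) (ts : List Int) :
    (List.range ((ts.length + C - 1) / C)).map
        (fun k => pvRle ((ts.drop (k * C)).take C)) = pvChunks (C - 1) ts := by
  have H : ∀ (n : Nat) (ts : List Int), ts.length = n →
      (List.range ((ts.length + C - 1) / C)).map
        (fun k => pvRle ((ts.drop (k * C)).take C)) = pvChunks (C - 1) ts := by
    intro n
    induction n using Nat.strong_induction_on with
    | _ n ih =>
      intro ts hn
      cases ts with
      | nil =>
        rw [show ([] : List Int).length + C - 1 = C - 1 from by simp,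
          Nat.div_eq_of_lt (by omega)]
        simp [pvChunks]
      | cons t ts' =>
        rw [pvChunks, List.length_cons,
          show ts'.length + 1 + C - 1 = ts'.length + C from by omega,
          Nat.add_div_right _ hC, List.range_succ_eq_map, List.map_cons, List.map_map]
        congr 1
        · rw [Nat.zero_mul, List.drop_zero]
          congr 1
          conv_lhs => rw [show C = (C - 1) + 1 from by omega]
          rw [List.take_succ_cons]
        · have hlt : (ts'.drop (C - 1)).length < n := by
            simp only [List.length_cons] at hn
            simp only [List.length_drop]
            omega
          have hm : ((ts'.drop (C - 1)).length + C - 1) / C = ts'.length / C := by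
            by_cases h : ts'.length ≤ C - 1
            · rw [List.length_drop, show ts'.length - (C - 1) = 0 from by omega,
                Nat.div_eq_of_lt (by omega), Nat.div_eq_of_lt (by omega)]
            · rw [List.length_drop, show ts'.length - (C - 1) + C - 1 = ts'.length from by omega]
          have hih := ih _ hlt (ts'.drop (C - 1)) rfl
          rw [hm] at hih
          rw [← hih]
          apply List.map_congr_left
          intro k hk
          simp only [Function.comp]
          congr 2
          rw [List.drop_drop,
            show Nat.succ k * C = (k * C + (C - 1)) + 1 from by
              rw [Nat.succ_mul]; omega]
          rw [List.drop_succ_cons]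
          congr 1
          omega
  exact H ts.length ts rfl

theorem pvA_eq (ws ps : List Int) (c : Int) (hc : 0 < c) :
    build_lm_head_pass_segments ws ps c =
      pvChunks (c.toNat - 1) ((ws.zip ps).flatMap (fun p => List.replicate p.2.toNat p.1)) := by
  unfold build_lm_head_pass_segments
  simp only [PySem.List.foldl_append_eq_flatMap, List.nil_append]
  set T : List Int := (ws.zip ps).flatMap (fun p => List.replicate p.2.toNat p.1) with hT
  set C : Nat := c.toNat with hCdef
  have hcC : c = (C : Int) := by omega
  have hC1 : 0 < C := by omega
  have hnum : PySem.Int.floordiv ((T.length : Int) + c - 1) c =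
      (((T.length + C - 1) / C : Nat) : Int) := by
    rw [show ((T.length : Int) + c - 1) = ((T.length + C - 1 : Nat) : Int) from by
        push_cast [hCdef]; omega,
      hcC, PySem.Int.floordiv_natCast]
  rw [hnum, PySem.List.pyRange_one, ← List.map_eq_flatMap, List.map_map]
  have hlen : ((((T.length + C - 1) / C : Nat) : Int) - 0).toNat = (T.length + C - 1) / C := by
    rw [sub_zero, Int.toNat_natCast]
  rw [hlen]
  have hpt : ∀ k ∈ List.range ((T.length + C - 1) / C),
      ((fun i => pvPassSeg T c (T.length : Int) i) ∘ fun k : Nat => 0 + (k : Int)) k =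
        pvRle ((T.drop (k * C)).take C) := by
    intro k _
    simp only [Function.comp, zero_add]
    rw [pvA_pass T c (k : Int) hc (Int.natCast_nonneg k)]
    congr 2
    rw [hcC, ← Nat.cast_mul, Int.toNat_natCast]
  rw [List.map_congr_left hpt, pvA_chunks C hC1 T]

theorem pvB_eq (ws ps : List Int) (c : Int) (hc : 0 < c) :
    build_lm_head_pass_segments_alt ws ps c =
      pvChunks (c.toNat - 1) ((ws.zip ps).flatMap (fun p => List.replicate p.2.toNat p.1)) := by
  have hfin : build_lm_head_pass_segments_alt ws ps c =
      pvFin ((ws.zip ps).foldl (fun st p => pvConsume c p.1 p.2.toNat p.2 st)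
        ([], [], [], c)) := rfl
  rw [hfin, pvB_flat c hc (ws.zip ps) ([], [], [], c) (by exact hc),
    pvMaster c hc _ [], List.nil_append]

-- ===== VERDICT (by name: the statement is the Claim_ definition above) =====
theorem build_lm_head_pass_segments_spec : Claim_equal_build_lm_head_pass_segments := by
  unfold Claim_equal_build_lm_head_pass_segments
  intro ws ps c _ hpre
  unfold Spec_build_lm_head_pass_segments
  rw [pvA_eq ws ps c hpre, pvB_eq ws ps c hpre]
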